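-- pv_equiv track=rewrite | github.com/Quillox/mpnn_partial_charges | param_ml/utils/utils.py | read_tripos_sections
-- ===== SOURCE A (Python) =====
-- tripos_keys = [ "@<TRIPOS>ALT_TYPE",
--                 "@<TRIPOS>ANCHOR_ATOM",
--                 "@<TRIPOS>ASSOCIATED_ANNOTATION",
--                 "@<TRIPOS>ATOM",
--                 "@<TRIPOS>BOND",
--                 "@<TRIPOS>CENTER_OF_MASS",
--                 "@<TRIPOS>CENTROID",
--                 "@<TRIPOS>COMMENT",
--                 "@<TRIPOS>CRYSIN",
--                 "@<TRIPOS>DICT",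
--                 "@<TRIPOS>DATA_FILE",
--                 "@<TRIPOS>EXTENSION_POINT",
--                 "@<TRIPOS>FF_PBC",
--                 "@<TRIPOS>FFCON_ANGLE",
--                 "@<TRIPOS>FFCON_DIST",
--                 "@<TRIPOS>FFCON_MULTI",
--                 "@<TRIPOS>FFCON_RANGE",
--                 "@<TRIPOS>FFCON_TORSION",
--                 "@<TRIPOS>LINE",
--                 "@<TRIPOS>LSPLANE",
--                 "@<TRIPOS>MOLECULE",
--                 "@<TRIPOS>NORMAL",
--                 "@<TRIPOS>QSAR_ALIGN_RULE",
--                 "@<TRIPOS>RING_CLOSURE",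
--                 "@<TRIPOS>ROTATABLE_BOND",
--                 "@<TRIPOS>SEARCH_DIST",
--                 "@<TRIPOS>SEARCH_OPTIONS",
--                 "@<TRIPOS>SET",
--                 "@<TRIPOS>SUBSTRUCTURE",
--                 "@<TRIPOS>U_FEAT",
--                 "@<TRIPOS>UNITY_ATOM_ATTR",
--                 "@<TRIPOS>UNITY_BOND_ATTR"]
--
-- def safe_cast(value, target_type, default=None):
--     try:
--         return target_type(value)
--     except (ValueError, TypeError):
--         return default
--
-- def read_tripos_sections(mol2_string):
--     """Read the tripos sections.
--
--     Parameters
--     ----------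
--     mol2_string : str
--         The mol2 file contents.
--
--     Returns
--     -------
--     dict[str, list]
--         The mol2 file contents separated into sections.
--     """
--
--     tripos_sections = dict.fromkeys(tripos_keys, [])
--     lines = mol2_string.strip().split("\n")
--     lines = [x.strip() for x in lines]
--     section_indexes = [
--         i for i, x in enumerate(lines) if x in tripos_keys]
--     sections = [lines[i:j]
--                 for i, j in zip([0]+section_indexes, section_indexes+[None])]
--     sections = [x for x in sections if x]
--     for section in sections:
--         tripos_sections[section[0]] = section[1:]
--
--     if ("@<TRIPOS>ALT_TYPE" in tripos_sections):
--         nats = len(tripos_sections["@<TRIPOS>ATOM"])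
--         for k in range(1,len(tripos_sections["@<TRIPOS>ALT_TYPE"]),2):
--             tokened = tripos_sections["@<TRIPOS>ALT_TYPE"][k].split()
--             if (len(tokened) >= 3):
--                 effstr = tokened[0]
--                 keepit = False
--                 for i in range(0,len(tokened)):
--                     if (i%2 == 1):
--                         atix = safe_cast(tokened[i],int,0)
--                         if ((atix >= 1) and (atix <= nats)):
--                             keepit = True
--                             effstr += " "+tokened[i]
--                         else:
--                             keepit = False
--                     else:
--                         if keepit:
--                             effstr += " "+tokened[i]
--                 if (len(effstr) > len(tokened[0])):
--                     tripos_sections["@<TRIPOS>ALT_TYPE"][k] = effstr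
--
--     return tripos_sections
-- ===== SOURCE B (Python) =====
-- tripos_keys = [ "@<TRIPOS>ALT_TYPE",
--                 "@<TRIPOS>ANCHOR_ATOM",
--                 "@<TRIPOS>ASSOCIATED_ANNOTATION",
--                 "@<TRIPOS>ATOM",
--                 "@<TRIPOS>BOND",
--                 "@<TRIPOS>CENTER_OF_MASS",
--                 "@<TRIPOS>CENTROID",
--                 "@<TRIPOS>COMMENT",
--                 "@<TRIPOS>CRYSIN",
--                 "@<TRIPOS>DICT",
--                 "@<TRIPOS>DATA_FILE",
--                 "@<TRIPOS>EXTENSION_POINT",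
--                 "@<TRIPOS>FF_PBC",
--                 "@<TRIPOS>FFCON_ANGLE",
--                 "@<TRIPOS>FFCON_DIST",
--                 "@<TRIPOS>FFCON_MULTI",
--                 "@<TRIPOS>FFCON_RANGE",
--                 "@<TRIPOS>FFCON_TORSION",
--                 "@<TRIPOS>LINE",
--                 "@<TRIPOS>LSPLANE",
--                 "@<TRIPOS>MOLECULE",
--                 "@<TRIPOS>NORMAL",
--                 "@<TRIPOS>QSAR_ALIGN_RULE",
--                 "@<TRIPOS>RING_CLOSURE",
--                 "@<TRIPOS>ROTATABLE_BOND",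
--                 "@<TRIPOS>SEARCH_DIST",
--                 "@<TRIPOS>SEARCH_OPTIONS",
--                 "@<TRIPOS>SET",
--                 "@<TRIPOS>SUBSTRUCTURE",
--                 "@<TRIPOS>U_FEAT",
--                 "@<TRIPOS>UNITY_ATOM_ATTR",
--                 "@<TRIPOS>UNITY_BOND_ATTR"]
--
-- _key_set = frozenset(tripos_keys)
--
--
-- def _clean_alt_type_line(line, nats):
--     """Filter an odd ALT_TYPE line, keeping only (atom-id, type) pairs with a valid id."""
--     tokened = line.split()
--     if len(tokened) < 3:
--         return line
--     effstr = tokened[0]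
--     keepit = False
--     for i, tok in enumerate(tokened):
--         if i % 2 == 1:
--             try:
--                 atix = int(tok)
--             except ValueError:
--                 atix = 0
--             keepit = 1 <= atix <= nats
--             if keepit:
--                 effstr += " " + tok
--         elif keepit:
--             effstr += " " + tok
--     return effstr if len(effstr) > len(tokened[0]) else line
--
--
-- def read_tripos_sections(mol2_string):
--     """Read the tripos sections (single streaming pass)."""
--     tripos_sections = dict.fromkeys(tripos_keys, [])
--     lines = [x.strip() for x in mol2_string.strip().split("\n")]
--     header = lines[0]
--     body = []
--     for line in lines[1:]:
--         if line in _key_set: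
--             tripos_sections[header] = body
--             header = line
--             body = []
--         else:
--             body.append(line)
--     tripos_sections[header] = body
--
--     nats = len(tripos_sections["@<TRIPOS>ATOM"])
--     alt = tripos_sections["@<TRIPOS>ALT_TYPE"]
--     tripos_sections["@<TRIPOS>ALT_TYPE"] = [
--         _clean_alt_type_line(l, nats) if k % 2 == 1 else l
--         for k, l in enumerate(alt)]
--     return tripos_sections
-- ===== Notes on version B (the rewrite author's own statement) =====
-- stated objective: simpler
-- what changed: A's two-phase sectioning (enumerate all key indexes, zip-slice the line list into chunks, assign each chunk) is replaced by a single streaming pass keeping a current header and body, and A's in-place odd-index ALT_TYPE patch loop with its effstr/keepit state machine is factored into a per-line cleaning helper mapped over the section.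
import Mathlib
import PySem

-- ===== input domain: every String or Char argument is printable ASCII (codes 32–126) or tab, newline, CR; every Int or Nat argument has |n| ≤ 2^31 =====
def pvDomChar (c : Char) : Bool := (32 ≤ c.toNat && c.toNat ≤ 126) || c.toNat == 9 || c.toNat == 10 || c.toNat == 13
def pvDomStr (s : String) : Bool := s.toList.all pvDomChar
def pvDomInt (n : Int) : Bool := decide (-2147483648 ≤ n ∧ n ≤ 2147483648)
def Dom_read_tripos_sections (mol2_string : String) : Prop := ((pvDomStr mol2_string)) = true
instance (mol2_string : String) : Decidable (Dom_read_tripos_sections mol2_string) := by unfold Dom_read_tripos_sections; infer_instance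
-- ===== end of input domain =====

-- B replaces A's index/zip/slice two-phase sectioning by a single streaming pass and the
-- in-place odd-index ALT_TYPE patch loop by a per-line cleaning helper mapped over the
-- section (objective: simpler). Return-value equivalence; A mutates no argument.

def tripos_keys : List String :=
  [ "@<TRIPOS>ALT_TYPE",
    "@<TRIPOS>ANCHOR_ATOM",
    "@<TRIPOS>ASSOCIATED_ANNOTATION",
    "@<TRIPOS>ATOM",
    "@<TRIPOS>BOND",
    "@<TRIPOS>CENTER_OF_MASS",
    "@<TRIPOS>CENTROID",
    "@<TRIPOS>COMMENT",
    "@<TRIPOS>CRYSIN",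
    "@<TRIPOS>DICT",
    "@<TRIPOS>DATA_FILE",
    "@<TRIPOS>EXTENSION_POINT",
    "@<TRIPOS>FF_PBC",
    "@<TRIPOS>FFCON_ANGLE",
    "@<TRIPOS>FFCON_DIST",
    "@<TRIPOS>FFCON_MULTI",
    "@<TRIPOS>FFCON_RANGE",
    "@<TRIPOS>FFCON_TORSION",
    "@<TRIPOS>LINE",
    "@<TRIPOS>LSPLANE",
    "@<TRIPOS>MOLECULE",
    "@<TRIPOS>NORMAL",
    "@<TRIPOS>QSAR_ALIGN_RULE",
    "@<TRIPOS>RING_CLOSURE",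
    "@<TRIPOS>ROTATABLE_BOND",
    "@<TRIPOS>SEARCH_DIST",
    "@<TRIPOS>SEARCH_OPTIONS",
    "@<TRIPOS>SET",
    "@<TRIPOS>SUBSTRUCTURE",
    "@<TRIPOS>U_FEAT",
    "@<TRIPOS>UNITY_ATOM_ATTR",
    "@<TRIPOS>UNITY_BOND_ATTR" ]

-- ===== PORT A =====
-- safe_cast(value, int, default): int(value) with try/except ValueError (ofStr? is exact there)
def safe_cast (value : String) (default : Int) : Int :=
  match PySem.Int.ofStr? value with
  | some n => n
  | none => default

def read_tripos_sections (mol2_string : String) : List (String × List String) :=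
  -- tripos_sections = dict.fromkeys(tripos_keys, [])
  let tripos_sections : PySem.Dict String (List String) :=
    PySem.Dict.ofList (tripos_keys.map (fun k => (k, ([] : List String))))
  -- sep "\n" ≠ "", so split? never returns none
  let lines := (PySem.Str.split? (PySem.Str.strip mol2_string) "\n").getD []
  let lines := lines.map PySem.Str.strip
  let section_indexes : List Int :=
    ((PySem.List.enumerate lines).filter (fun p => tripos_keys.contains p.2)).map (fun p => p.1)
  let sections : List (List String) :=
    (((0 : Int) :: section_indexes).zip (section_indexes.map some ++ [none])).map
      (fun ij => PySem.List.slice lines (some ij.1) ij.2)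
  let sections := sections.filter (fun x => !x.isEmpty)
  let tripos_sections := sections.foldl
    (fun d sec => d.insert (sec.headD "") sec.tail) tripos_sections
  if tripos_sections.contains "@<TRIPOS>ALT_TYPE" then
    -- both keys are in dict.fromkeys(tripos_keys, []), so d[k] never raises: getD never defaults
    let nats : Int := PySem.List.len (tripos_sections.getD "@<TRIPOS>ATOM" [])
    let alt0 := tripos_sections.getD "@<TRIPOS>ALT_TYPE" []
    -- Python mutates the list held by the dict at odd indexes k; the fold carries that list
    let altFinal := (PySem.List.pyRange 1 (PySem.List.len alt0) 2).foldl
      (fun alt k =>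
        -- k is in range, so alt[k] / tokened[i] never raise: pyGetD never defaults
        let tokened := PySem.Str.split₀ (PySem.List.pyGetD alt k "")
        if 3 ≤ tokened.length then
          let st := (PySem.List.pyRange 0 (PySem.List.len tokened) 1).foldl
            (fun (st : String × Bool) i =>
              if PySem.Int.mod i 2 == 1 then
                let atix := safe_cast (PySem.List.pyGetD tokened i "") 0
                if 1 ≤ atix ∧ atix ≤ nats then (st.1 ++ " " ++ PySem.List.pyGetD tokened i "", true)
                else (st.1, false)
              else
                if st.2 then (st.1 ++ " " ++ PySem.List.pyGetD tokened i "", st.2) else st)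
            (tokened.headD "", false)
          if PySem.Str.len (tokened.headD "") < PySem.Str.len st.1 then
            PySem.List.pySetD alt k st.1
          else alt
        else alt)
      alt0
    (tripos_sections.insert "@<TRIPOS>ALT_TYPE" altFinal).items
  else tripos_sections.items

-- ===== PORT B =====
def key_set : PySem.Set String := PySem.Set.ofList tripos_keys

def clean_alt_type_line (line : String) (nats : Int) : String :=
  let tokened := PySem.Str.split₀ line
  if tokened.length < 3 then line
  else
    let st := (PySem.List.enumerate tokened).foldl
      (fun (st : String × Bool) p =>
        if PySem.Int.mod p.1 2 == 1 then
          let atix := match PySem.Int.ofStr? p.2 with | some n => n | none => 0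
          if 1 ≤ atix ∧ atix ≤ nats then (st.1 ++ " " ++ p.2, true)
          else (st.1, false)
        else if st.2 then (st.1 ++ " " ++ p.2, st.2) else st)
      (tokened.headD "", false)
    if PySem.Str.len (tokened.headD "") < PySem.Str.len st.1 then st.1 else line

def stream_sections (d : PySem.Dict String (List String)) (header : String)
    (body : List String) : List String → PySem.Dict String (List String)
  | [] => d.insert header body
  | l :: t =>
    if key_set.contains l then stream_sections (d.insert header body) l [] t
    else stream_sections d header (body ++ [l]) t

def read_tripos_sections_alt (mol2_string : String) : List (String × List String) :=
  let tripos_sections : PySem.Dict String (List String) :=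
    PySem.Dict.ofList (tripos_keys.map (fun k => (k, ([] : List String))))
  -- sep "\n" ≠ "", so split? never returns none; lines[0] exists (split is never empty)
  let lines := ((PySem.Str.split? (PySem.Str.strip mol2_string) "\n").getD []).map PySem.Str.strip
  let tripos_sections := stream_sections tripos_sections (lines.headD "") [] lines.tail
  -- both keys are in dict.fromkeys(tripos_keys, []), so d[k] never raises: getD never defaults
  let nats : Int := PySem.List.len (tripos_sections.getD "@<TRIPOS>ATOM" [])
  let alt := tripos_sections.getD "@<TRIPOS>ALT_TYPE" []
  (tripos_sections.insert "@<TRIPOS>ALT_TYPE"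
    ((PySem.List.enumerate alt).map
      (fun p => if PySem.Int.mod p.1 2 == 1 then clean_alt_type_line p.2 nats else p.2))).items

-- ===== PRECONDITION & SPEC =====
def Spec_read_tripos_sections (mol2_string : String) (out : List (String × List String)) : Prop := out = read_tripos_sections_alt mol2_string
instance (mol2_string : String) (out : List (String × List String)) : Decidable (Spec_read_tripos_sections mol2_string out) := by unfold Spec_read_tripos_sections; infer_instance

-- ===== CLAIM (what is proved, stated in full; the proofs are below) =====
def Claim_equal_read_tripos_sections : Prop := ∀ (mol2_string : String), Dom_read_tripos_sections mol2_string → Spec_read_tripos_sections mol2_string (read_tripos_sections mol2_string)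

-- ===== LEMMAS AND PROOFS =====

-- abbreviation for "this line is a TRIPOS key" (A's membership test)
def pvP (l : String) : Bool := tripos_keys.contains l

-- the (header, body) pairs a grouping of the given lines produces, from the second group on
def restPairs : List String → List (String × List String)
  | [] => []
  | k :: t => (k, t.takeWhile (fun l => !pvP l)) :: restPairs (t.dropWhile (fun l => !pvP l))
  termination_by l => l.length
  decreasing_by
    have := List.length_dropWhile_le (fun l => !pvP l) t
    simp
    omega

theorem contains_key_set (l : String) : key_set.contains l = pvP l := by
  simp only [key_set, PySem.Set.contains_eq_listContains, pvP]
  by_cases h : l ∈ tripos_keys <;>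
    simp [PySem.Set.mem_ofList, h]

-- B's streaming loop = one insert per (header, body) group
theorem stream_eq : ∀ (t : List String) (d : PySem.Dict String (List String)) (h : String) (b : List String),
    stream_sections d h b t =
      ((h, b ++ t.takeWhile (fun l => !pvP l)) :: restPairs (t.dropWhile (fun l => !pvP l))).foldl
        (fun d p => d.insert p.1 p.2) d := by
  intro t
  induction t with
  | nil => intro d h b; simp [stream_sections, restPairs]
  | cons l t ih =>
    intro d h b
    by_cases hl : pvP l = true
    · simp only [stream_sections, contains_key_set, hl, if_pos]
      rw [ih, List.takeWhile_cons_of_neg (by simp [hl]),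
        List.dropWhile_cons_of_neg (by simp [hl])]
      conv_rhs => rw [restPairs]
      simp
    · simp only [stream_sections, contains_key_set, hl]
      rw [if_neg (by simp), ih, List.takeWhile_cons_of_pos (by simp [hl]),
        List.dropWhile_cons_of_pos (by simp [hl])]
      simp

-- A's section_indexes / sections expressions, named for the proofs
def secIdx (lines : List String) : List Int :=
  ((PySem.List.enumerate lines).filter (fun p => tripos_keys.contains p.2)).map (fun p => p.1)

def zipSlices (lines : List String) (idx : List Int) : List (List String) :=
  (((0 : Int) :: idx).zip (idx.map some ++ [none])).map
    (fun ij => PySem.List.slice lines (some ij.1) ij.2)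

theorem enum_shift {α : Type} (xs : List α) (s : Int) :
    PySem.List.enumerate xs (s + 1) = (PySem.List.enumerate xs s).map (fun p => (p.1 + 1, p.2)) := by
  induction xs generalizing s with
  | nil => simp [PySem.List.enumerate_nil]
  | cons x xs ih => simp [PySem.List.enumerate_cons, ih]

theorem secIdx_cons (h : String) (t : List String) :
    secIdx (h :: t) = (if pvP h then [(0 : Int)] else []) ++ (secIdx t).map (· + 1) := by
  simp only [secIdx, PySem.List.enumerate_cons]
  rw [show (0 : Int) + 1 = 0 + 1 by ring, enum_shift]
  by_cases hh : h ∈ tripos_keys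
  · have hp : pvP h = true := by simp [pvP, hh]
    simp [hp, hh, List.filter_map, List.map_map, Function.comp_def]
  · have hp : pvP h = false := by simp [pvP, hh]
    simp [hp, hh, List.filter_map, List.map_map, Function.comp_def]

theorem secIdx_nonneg (lines : List String) : ∀ x ∈ secIdx lines, 0 ≤ x := by
  intro x hx
  simp only [secIdx, List.mem_map, List.mem_filter] at hx
  obtain ⟨p, ⟨hp, -⟩, rfl⟩ := hx
  rw [PySem.List.mem_enumerate_iff] at hp
  obtain ⟨k, -, rfl⟩ := hp
  simp

-- slicing h :: t with shifted indexes = h prepended to the first slice of t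
theorem zipSlices_shift (h : String) (t : List String) (idx : List Int) (hnn : ∀ x ∈ idx, 0 ≤ x) :
    zipSlices (h :: t) (idx.map (· + 1)) =
      (h :: (zipSlices t idx).headD []) :: (zipSlices t idx).tail := by
  cases idx with
  | nil =>
    simp [zipSlices, PySem.List.slice_zero_start, PySem.List.slice_none_none]
  | cons a r =>
    have ha : 0 ≤ a := hnn a (by simp)
    have hr : ∀ x ∈ r, 0 ≤ x := fun x hx => hnn x (by simp [hx])
    simp only [zipSlices, List.map_cons, List.zip_cons_cons, List.map_cons, List.cons_append,
      List.headD_cons, List.tail_cons]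
    congr 1
    · -- first slice: lines[0:a+1] = h :: t[0:a]
      rw [PySem.List.slice_zero_start, PySem.List.slice_zero_start,
        PySem.List.slice_to _ (by omega), PySem.List.slice_to _ ha]
      rw [show (a + 1).toNat = a.toNat + 1 by omega]
      simp
    · -- remaining slices: pointwise shift
      have hmap : (List.map (· + (1 : Int)) r).map some ++ [none] =
          ((r.map some ++ [none]).map (Option.map (· + (1 : Int)))) := by
        simp [List.map_map, Function.comp_def]
      rw [hmap, show ((a + 1) :: List.map (· + (1 : Int)) r) = (a :: r).map (· + (1 : Int)) by simp,
        List.zip_map, List.map_map]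
      apply List.map_congr_left
      intro p hp
      have hp1 : p.1 ∈ a :: r := (List.of_mem_zip hp).1
      have hp2 : p.2 ∈ r.map some ++ [none] := (List.of_mem_zip hp).2
      have hp1' : 0 ≤ p.1 := by
        rcases List.mem_cons.mp hp1 with h' | h'
        · omega
        · exact hr _ h'
      cases hq : p.2 with
      | none =>
        simp only [Function.comp_def, Prod.map, hq, Option.map_none]
        rw [PySem.List.slice_from _ (by omega), PySem.List.slice_from _ hp1']
        rw [show (p.1 + 1).toNat = p.1.toNat + 1 by omega]
        simp
      | some b =>
        have hb : 0 ≤ b := by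
          rw [hq] at hp2
          simp only [List.mem_append, List.mem_map] at hp2
          rcases hp2 with ⟨x, hx, hx'⟩ | h'
          · cases hx'; exact hr _ hx
          · simp at h'
        simp only [Function.comp_def, Prod.map, hq, Option.map_some]
        rw [PySem.List.slice_toNat _ (by omega) (by omega), PySem.List.slice_toNat _ hp1' hb]
        rw [show (p.1 + 1).toNat = p.1.toNat + 1 by omega, show (b + 1).toNat = b.toNat + 1 by omega]
        simp

-- structure of A's raw section list on a cons
theorem zipSlices_cons (h : String) (t : List String) :
    zipSlices (h :: t) (secIdx (h :: t)) =
      (if pvP h then [([] : List String)] else []) ++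
        (h :: (zipSlices t (secIdx t)).headD []) :: (zipSlices t (secIdx t)).tail := by
  rw [secIdx_cons]
  by_cases hh : pvP h
  · simp only [hh, if_pos, List.singleton_append]
    have : zipSlices (h :: t) ((0 : Int) :: (secIdx t).map (· + 1)) =
        PySem.List.slice (h :: t) (some 0) (some 0) ::
          zipSlices (h :: t) ((secIdx t).map (· + 1)) := by
      simp [zipSlices]
    rw [this, zipSlices_shift h t _ (secIdx_nonneg t)]
    rw [PySem.List.slice_zero_start, PySem.List.slice_to _ le_rfl]
    simp
  · simp only [hh, if_neg, Bool.false_eq_true, not_false_iff, List.nil_append]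
    simpa using zipSlices_shift h t _ (secIdx_nonneg t)

theorem zipSlices_nil : zipSlices [] (secIdx []) = [[]] := by
  simp [zipSlices, secIdx, PySem.List.enumerate_nil, PySem.List.slice_zero_start,
    PySem.List.slice_none_none]

-- head and tail of A's raw section list, described by takeWhile / dropWhile
theorem rawShape (t : List String) :
    (zipSlices t (secIdx t)).headD [] = t.takeWhile (fun l => !pvP l) ∧
      ((zipSlices t (secIdx t)).tail.filter (fun x => !x.isEmpty)).map
          (fun s => (s.headD "", s.tail)) =
        restPairs (t.dropWhile (fun l => !pvP l)) := by
  induction t with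
  | nil => simp [zipSlices_nil, restPairs]
  | cons l t ih =>
    obtain ⟨ih1, ih2⟩ := ih
    by_cases hl : pvP l = true
    · rw [zipSlices_cons, if_pos hl]
      constructor
      · rw [List.singleton_append, List.headD_cons,
          List.takeWhile_cons_of_neg (by simp [hl])]
      · rw [List.singleton_append, List.tail_cons,
          List.dropWhile_cons_of_neg (by simp [hl])]
        conv_rhs => rw [restPairs]
        rw [List.filter_cons_of_pos (by simp), List.map_cons]
        simp only [List.headD_cons, List.tail_cons]
        rw [ih1, ih2]
    · rw [zipSlices_cons, if_neg hl, List.nil_append]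
      constructor
      · rw [List.headD_cons, List.takeWhile_cons_of_pos (by simp [hl]), ih1]
      · rw [List.tail_cons, List.dropWhile_cons_of_pos (by simp [hl]), ih2]

-- the assignment pairs A performs = the groups B flushes
theorem pairsA (h : String) (t : List String) :
    ((zipSlices (h :: t) (secIdx (h :: t))).filter (fun x => !x.isEmpty)).map
        (fun s => (s.headD "", s.tail)) =
      (h, t.takeWhile (fun l => !pvP l)) :: restPairs (t.dropWhile (fun l => !pvP l)) := by
  obtain ⟨h1, h2⟩ := rawShape t
  by_cases hl : pvP h = true
  · rw [zipSlices_cons, if_pos hl, List.singleton_append,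
      List.filter_cons_of_neg (by simp), List.filter_cons_of_pos (by simp), List.map_cons]
    simp only [List.headD_cons, List.tail_cons]
    rw [h1, h2]
  · rw [zipSlices_cons, if_neg hl, List.nil_append,
      List.filter_cons_of_pos (by simp), List.map_cons]
    simp only [List.headD_cons, List.tail_cons]
    rw [h1, h2]

-- pySetD with the element already there is the identity
theorem setD_self {α : Type} [Inhabited α] (xs : List α) (k : Int) (d : α) (hk : 0 ≤ k) :
    PySem.List.pySetD xs k (PySem.List.pyGetD xs k d) = xs := by
  obtain ⟨n, rfl⟩ : ∃ n : Nat, k = (n : Int) := ⟨k.toNat, by omega⟩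
  rw [PySem.List.pySetD_natCast, PySem.List.pyGetD_natCast]
  by_cases hn : n < xs.length
  · rw [List.getD_eq_getElem xs d hn]
    exact List.set_getElem_self hn
  · exact List.set_eq_of_length_le (by omega)

-- a fold writing g(xs[k]) at distinct in-range indexes, described pointwise
theorem fold_set_odd (g : String → String) :
    ∀ (ks : List Int) (cur orig : List String),
      ks.Nodup →
      (∀ k ∈ ks, 0 ≤ k ∧ k.toNat < cur.length ∧ cur[k.toNat]? = orig[k.toNat]?) →
      ∀ j : Nat,
        ((ks.foldl (fun a k => PySem.List.pySetD a k (g (PySem.List.pyGetD a k ""))) cur)[j]?)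
          = if (j : Int) ∈ ks then (orig[j]?).map g else cur[j]? := by
  intro ks
  induction ks with
  | nil => intro cur orig _ _ j; simp
  | cons k ks ih =>
    intro cur orig hnd hmem j
    obtain ⟨hk0, hklt, hkeq⟩ := hmem k (by simp)
    have hkn : k = ((k.toNat : Nat) : Int) := by omega
    have hcur' : PySem.List.pySetD cur k (g (PySem.List.pyGetD cur k "")) =
        cur.set k.toNat (g (cur.getD k.toNat "")) := by
      conv_lhs => rw [hkn]
      rw [PySem.List.pySetD_natCast, PySem.List.pyGetD_natCast]
    simp only [List.foldl_cons, hcur']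
    rw [ih _ orig (List.nodup_cons.mp hnd).2]
    · by_cases hjks : (j : Int) ∈ ks
      · simp [List.mem_cons, hjks]
      · by_cases hjk : (j : Int) = k
        · have hj : j = k.toNat := by omega
          subst hj
          rw [if_neg hjks, if_pos (by simp [hjk])]
          rw [List.getElem?_set_self (by omega)]
          rw [List.getD_eq_getElem cur "" (by omega)]
          have : cur[k.toNat]? = some cur[k.toNat] := List.getElem?_eq_getElem (by omega)
          rw [this] at hkeq
          rw [← hkeq]
          simp
        · rw [if_neg hjks, if_neg (by simp [hjk, hjks])]
          exact List.getElem?_set_ne (by omega)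
    · intro k' hk'
      obtain ⟨h0, hlt, heq⟩ := hmem k' (by simp [hk'])
      have hne : k' ≠ k := by
        intro hcon
        exact (List.nodup_cons.mp hnd).1 (hcon ▸ hk')
      refine ⟨h0, by simpa using hlt, ?_⟩
      rw [List.getElem?_set_ne (by omega)]
      exact heq

theorem pyRange_two_nodup (n : Int) : (PySem.List.pyRange 1 n 2).Nodup := by
  rw [PySem.List.pyRange_of_pos 1 n (by omega)]
  refine List.Nodup.map ?_ (List.nodup_range)
  intro a b hab
  simp only [] at hab
  omega

-- the inner token loop of A (index loop) = the inner token loop of B (enumerate loop)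
theorem inner_eq (nats : Int) (tokened : List String) :
    (PySem.List.pyRange 0 (PySem.List.len tokened) 1).foldl
      (fun (st : String × Bool) i =>
        if PySem.Int.mod i 2 == 1 then
          let atix := safe_cast (PySem.List.pyGetD tokened i "") 0
          if 1 ≤ atix ∧ atix ≤ nats then (st.1 ++ " " ++ PySem.List.pyGetD tokened i "", true)
          else (st.1, false)
        else
          if st.2 then (st.1 ++ " " ++ PySem.List.pyGetD tokened i "", st.2) else st)
      (tokened.headD "", false) =
    (PySem.List.enumerate tokened).foldl
      (fun (st : String × Bool) p =>
        if PySem.Int.mod p.1 2 == 1 then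
          let atix := match PySem.Int.ofStr? p.2 with | some n => n | none => 0
          if 1 ≤ atix ∧ atix ≤ nats then (st.1 ++ " " ++ p.2, true)
          else (st.1, false)
        else if st.2 then (st.1 ++ " " ++ p.2, st.2) else st)
      (tokened.headD "", false) := by
  rw [PySem.List.enumerate_eq_map_pyRange tokened "", List.foldl_map]
  rfl

-- A's per-index ALT_TYPE step is exactly "write the cleaned line back"
theorem stepA_eq (nats : Int) (alt : List String) (k : Int) (hk : 0 ≤ k) :
    (let tokened := PySem.Str.split₀ (PySem.List.pyGetD alt k "")
     if 3 ≤ tokened.length then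
       let st := (PySem.List.pyRange 0 (PySem.List.len tokened) 1).foldl
         (fun (st : String × Bool) i =>
           if PySem.Int.mod i 2 == 1 then
             let atix := safe_cast (PySem.List.pyGetD tokened i "") 0
             if 1 ≤ atix ∧ atix ≤ nats then (st.1 ++ " " ++ PySem.List.pyGetD tokened i "", true)
             else (st.1, false)
           else
             if st.2 then (st.1 ++ " " ++ PySem.List.pyGetD tokened i "", st.2) else st)
         (tokened.headD "", false)
       if PySem.Str.len (tokened.headD "") < PySem.Str.len st.1 then
         PySem.List.pySetD alt k st.1
       else alt
     else alt) =
    PySem.List.pySetD alt k (clean_alt_type_line (PySem.List.pyGetD alt k "") nats) := by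
  simp only [clean_alt_type_line]
  by_cases h3 : 3 ≤ (PySem.Str.split₀ (PySem.List.pyGetD alt k "")).length
  · have h3' : ¬ ((PySem.Str.split₀ (PySem.List.pyGetD alt k "")).length < 3) := by omega
    rw [if_pos h3, if_neg h3', inner_eq]
    by_cases hlen : PySem.Str.len ((PySem.Str.split₀ (PySem.List.pyGetD alt k "")).headD "") <
        PySem.Str.len ((PySem.List.enumerate (PySem.Str.split₀ (PySem.List.pyGetD alt k ""))).foldl
          (fun (st : String × Bool) p =>
            if PySem.Int.mod p.1 2 == 1 then
              let atix := match PySem.Int.ofStr? p.2 with | some n => n | none => 0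
              if 1 ≤ atix ∧ atix ≤ nats then (st.1 ++ " " ++ p.2, true)
              else (st.1, false)
            else if st.2 then (st.1 ++ " " ++ p.2, st.2) else st)
          ((PySem.Str.split₀ (PySem.List.pyGetD alt k "")).headD "", false)).1
    · rw [if_pos hlen, if_pos hlen]
    · rw [if_neg hlen, if_neg hlen, setD_self _ _ _ hk]
  · have h3' : (PySem.Str.split₀ (PySem.List.pyGetD alt k "")).length < 3 := by omega
    rw [if_neg h3, if_pos h3', setD_self _ _ _ hk]

-- A's odd-index patch fold = B's enumerate map, for any list and atom count
theorem alt_eq (nats : Int) (alt : List String) :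
    (PySem.List.pyRange 1 (PySem.List.len alt) 2).foldl
      (fun a k =>
        let tokened := PySem.Str.split₀ (PySem.List.pyGetD a k "")
        if 3 ≤ tokened.length then
          let st := (PySem.List.pyRange 0 (PySem.List.len tokened) 1).foldl
            (fun (st : String × Bool) i =>
              if PySem.Int.mod i 2 == 1 then
                let atix := safe_cast (PySem.List.pyGetD tokened i "") 0
                if 1 ≤ atix ∧ atix ≤ nats then (st.1 ++ " " ++ PySem.List.pyGetD tokened i "", true)
                else (st.1, false)
              else
                if st.2 then (st.1 ++ " " ++ PySem.List.pyGetD tokened i "", st.2) else st)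
            (tokened.headD "", false)
          if PySem.Str.len (tokened.headD "") < PySem.Str.len st.1 then
            PySem.List.pySetD a k st.1
          else a
        else a)
      alt =
    (PySem.List.enumerate alt).map
      (fun p => if PySem.Int.mod p.1 2 == 1 then clean_alt_type_line p.2 nats else p.2) := by
  rw [PySem.List.foldl_congr_mem _ _
    (fun a k => PySem.List.pySetD a k (clean_alt_type_line (PySem.List.pyGetD a k "") nats)) _
    (fun a k hkmem => by
      have hk : 0 ≤ k := by
        rw [PySem.List.mem_pyRange_iff_of_pos (by omega)] at hkmem
        omega
      exact stepA_eq nats a k hk)]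
  apply List.ext_getElem?
  intro j
  rw [fold_set_odd (fun line => clean_alt_type_line line nats) _ alt alt
    (pyRange_two_nodup _)
    (fun k hkmem => by
      rw [PySem.List.mem_pyRange_iff_of_pos (by omega)] at hkmem
      simp only [PySem.List.len_eq] at hkmem
      exact ⟨by omega, by omega, rfl⟩)]
  rw [show ((PySem.List.enumerate alt).map
      (fun p => if PySem.Int.mod p.1 2 == 1 then clean_alt_type_line p.2 nats else p.2))[j]? =
      (alt[j]?).map (fun x => if PySem.Int.mod (j : Int) 2 == 1 then clean_alt_type_line x nats else x) by
    rw [List.getElem?_map, PySem.List.getElem?_enumerate, Option.map_map]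
    simp [Function.comp_def]]
  by_cases hj : j < alt.length
  · have hcond : ((j : Int) ∈ PySem.List.pyRange 1 (PySem.List.len alt) 2) ↔
        (PySem.Int.mod (j : Int) 2 == 1) = true := by
      rw [PySem.List.mem_pyRange_iff_of_pos (by omega)]
      rw [PySem.Int.mod_eq_emod_of_pos (by omega)]
      simp only [PySem.List.len_eq, beq_iff_eq]
      omega
    have hC : ((PySem.Int.mod (j : Int) 2 == 1) = true) ↔ j % 2 = 1 := by
      rw [PySem.Int.mod_eq_emod_of_pos (by omega)]
      simp only [beq_iff_eq]
      omega
    by_cases hodd : j % 2 = 1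
    · rw [if_pos (hcond.mpr (hC.mpr hodd))]
      rw [List.getElem?_eq_getElem hj]
      simp only [Option.map_some, Option.some.injEq, hC, hodd]
      simp
    · rw [if_neg (fun hc => hodd (hC.mp (hcond.mp hc)))]
      rw [List.getElem?_eq_getElem hj]
      simp only [Option.map_some, Option.some.injEq, hC, hodd]
      simp
  · have halt : alt[j]? = none := List.getElem?_eq_none (by omega)
    simp [halt]

-- both ports build the same section dict
theorem dict_eq (lh : String) (lt : List String) :
    (((zipSlices (lh :: lt) (secIdx (lh :: lt))).filter (fun x => !x.isEmpty)).foldl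
        (fun d sec => d.insert (sec.headD "") sec.tail)
        (PySem.Dict.ofList (tripos_keys.map (fun k => (k, ([] : List String)))))) =
      stream_sections (PySem.Dict.ofList (tripos_keys.map (fun k => (k, ([] : List String)))))
        lh [] lt := by
  rw [stream_eq]
  simp only [List.nil_append]
  rw [← pairsA lh lt, List.foldl_map]

-- the fold of inserts keeps every key of the initial dict
theorem contains_after_fold (pairs : List (String × List String))
    (d : PySem.Dict String (List String)) (k : String) (hk : d.contains k = true) :
    (pairs.foldl (fun d p => d.insert p.1 p.2) d).contains k = true := by
  rw [PySem.Dict.contains_iff_mem_keys]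
  rw [show (fun (d : PySem.Dict String (List String)) (p : String × List String) =>
      d.insert p.1 p.2) = fun d p => d.insert p.1 ((fun _ p => p.2) d p) from rfl]
  rw [PySem.Dict.keys_foldl_insert_key pairs Prod.fst (fun _ p => p.2) d]
  rw [PySem.Set.mem_update]
  exact Or.inl ((PySem.Dict.contains_iff_mem_keys d k).mp hk)

theorem splitOn_go_ne_nil (sep : List Char) :
    ∀ (fuel : Nat) (l cur : List Char) (acc : List (List Char)),
      PySem.Chars.splitOn.go sep fuel l cur acc ≠ [] := by
  intro fuel
  induction fuel with
  | zero => intro l cur acc; simp [PySem.Chars.splitOn.go]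
  | succ n ih =>
    intro l cur acc
    cases l with
    | nil => simp [PySem.Chars.splitOn.go]
    | cons c rest =>
      rw [PySem.Chars.splitOn.go]
      split
      · exact ih _ _ _
      · exact ih _ _ _

theorem splitOn_ne_nil (cs sep : List Char) : PySem.Chars.splitOn cs sep ≠ [] := by
  unfold PySem.Chars.splitOn
  exact splitOn_go_ne_nil _ _ _ _ _

theorem lines_ne_nil (s : String) :
    ((PySem.Str.split? s "\n").getD []).map PySem.Str.strip ≠ [] := by
  rw [show PySem.Str.split? s "\n" =
      some ((PySem.Chars.splitOn s.toList "\n".toList).map String.ofList) from rfl]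
  simp only [Option.getD_some, ne_eq, List.map_eq_nil_iff]
  exact fun h => splitOn_ne_nil s.toList "\n".toList (by simpa using h)

-- ===== VERDICT (by name: the statement is the Claim_ definition above) =====
set_option maxRecDepth 40000 in
theorem read_tripos_sections_spec : Claim_equal_read_tripos_sections := by
  intro s _
  unfold Spec_read_tripos_sections
  simp only [read_tripos_sections, read_tripos_sections_alt]
  obtain ⟨lh, lt, hline⟩ : ∃ lh lt,
      ((PySem.Str.split? (PySem.Str.strip s) "\n").getD []).map PySem.Str.strip = lh :: lt := by
    rcases hc : ((PySem.Str.split? (PySem.Str.strip s) "\n").getD []).map PySem.Str.strip with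
      _ | ⟨a, b⟩
    · exact absurd hc (lines_ne_nil _)
    · exact ⟨a, b, rfl⟩
  rw [hline]
  simp only [List.headD_cons, List.tail_cons]
  rw [show (((PySem.List.enumerate (lh :: lt)).filter
        (fun p => tripos_keys.contains p.2)).map (fun p => p.1)) = secIdx (lh :: lt) from rfl]
  rw [show ((((0 : Int) :: secIdx (lh :: lt)).zip ((secIdx (lh :: lt)).map some ++ [none])).map
      (fun ij => PySem.List.slice (lh :: lt) (some ij.1) ij.2)) =
      zipSlices (lh :: lt) (secIdx (lh :: lt)) from rfl]
  rw [dict_eq, stream_eq]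
  rw [if_pos (contains_after_fold _ _ _ (by decide))]
  rw [alt_eq]
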